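-- pv_equiv track=rewrite | github.com/shraddha-an/puzzles | 9_common_char_count.py | solution
-- ===== SOURCE A (Python) =====
-- from collections import Counter
--
-- def solution(s1, s2):
--     c1 = Counter(s1)
--
--     s = 0
--
--     for c in s2:
--         if c in c1:
--             s += 1
--
--             # Reduce its count in the counter
--             c1[c] -= 1
--
--             # Check if the char's count == 0; then remove it from the counter.
--             if c1[c] == 0:
--                 c1.pop(c)
--
--
--     return s
-- ===== SOURCE B (Python) =====
-- def solution(s1, s2):
--     l1, l2 = list(s1), list(s2)
--     return sum(min(l1.count(c), l2.count(c)) for c in set(l1))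
-- ===== Notes on version B (the rewrite author's own statement) =====
-- stated objective: idiomatic
-- what changed: Replaced A's Counter-plus-destructive scan of s2 (decrementing and popping keys) with a single order-independent aggregate: sum over the distinct characters of s1 of min(s1.count(c), s2.count(c)); no Counter, no mutation, no membership branch.
import Mathlib
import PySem

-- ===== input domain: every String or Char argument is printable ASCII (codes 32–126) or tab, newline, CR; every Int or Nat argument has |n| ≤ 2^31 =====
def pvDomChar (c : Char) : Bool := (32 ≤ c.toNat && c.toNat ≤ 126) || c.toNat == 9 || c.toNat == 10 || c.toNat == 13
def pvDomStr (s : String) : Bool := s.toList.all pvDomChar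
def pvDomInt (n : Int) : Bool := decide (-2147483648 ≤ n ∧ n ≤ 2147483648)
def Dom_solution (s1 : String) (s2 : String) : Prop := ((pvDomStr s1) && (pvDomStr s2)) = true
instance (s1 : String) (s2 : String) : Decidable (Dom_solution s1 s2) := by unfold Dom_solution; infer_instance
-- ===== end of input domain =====

-- B replaces A's destructive Counter-and-scan of s2 by a non-mutating aggregate
-- (sum over the distinct characters of s1 of the minimum of the two counts): simpler/idiomatic, same values.

-- ===== PORT A =====
-- one iteration of A's 'for c in s2' loop: state = (the Counter c1, the running total s)
def pvStepA (st : PySem.Dict Char Int × Int) (c : Char) : PySem.Dict Char Int × Int :=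
  if st.1.contains c then
    -- s += 1 ; c1[c] -= 1 ; if c1[c] == 0: c1.pop(c)
    let s := st.2 + 1
    let c1 := st.1.modify c 0 (fun v => v - 1)
    if c1.getD c 0 == 0 then (c1.erase c, s) else (c1, s)
  else st

def solution (s1 : String) (s2 : String) : Int :=
  let c1 := PySem.Dict.counter s1.toList
  (s2.toList.foldl pvStepA (c1, 0)).2

-- ===== PORT B =====
-- Source B: l1, l2 = list(s1), list(s2); return sum(min(l1.count(c), l2.count(c)) for c in set(l1))
def solution_alt (s1 : String) (s2 : String) : Int :=
  ((PySem.Set.ofList s1.toList).map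
    (fun c => min ((s1.toList.count c : Int)) ((s2.toList.count c : Int)))).sum

-- ===== PRECONDITION & SPEC =====
def Spec_solution (s1 : String) (s2 : String) (out : Int) : Prop := out = solution_alt s1 s2
instance (s1 : String) (s2 : String) (out : Int) : Decidable (Spec_solution s1 s2 out) := by unfold Spec_solution; infer_instance

-- ===== CLAIM (what is proved, stated in full; the proofs are below) =====
def Claim_equal_solution : Prop := ∀ (s1 : String) (s2 : String), Dom_solution s1 s2 → Spec_solution s1 s2 (solution s1 s2)

-- ===== LEMMAS AND PROOFS =====

-- Dict.erase facts not in the prelude, proved on the items list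
theorem pvAnyFilter (l : List (Char × Int)) (k : Char) :
    ((l.filter (fun p => !(p.1 == k))).any (fun p => p.1 == k)) = false := by
  induction l with
  | nil => simp
  | cons p t ih => by_cases h : p.1 = k <;> simp [h, ih]

theorem pvContainsEraseSelf (d : PySem.Dict Char Int) (k : Char) :
    (d.erase k).contains k = false := by
  simp only [PySem.Dict.erase, PySem.Dict.contains]
  exact pvAnyFilter d.items k

theorem pvContainsEraseNe (d : PySem.Dict Char Int) {k x : Char} (h : x ≠ k) :
    (d.erase k).contains x = d.contains x := by
  simp only [PySem.Dict.erase, PySem.Dict.contains]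
  induction d.items with
  | nil => simp
  | cons p t ih =>
    by_cases hp : p.1 = k
    · simp [hp, ih, show ¬ (k = x) from fun hkx => h hkx.symm]
    · simp [hp, ih]

theorem pvFindFilterNone (l : List (Char × Int)) (k : Char) :
    (l.filter (fun p => !(p.1 == k))).find? (fun p => p.1 == k) = none := by
  induction l with
  | nil => simp
  | cons p t ih => by_cases h : p.1 = k <;> simp [h, ih]

theorem pvGetDEraseSelf (d : PySem.Dict Char Int) (k : Char) :
    (d.erase k).getD k 0 = 0 := by
  simp only [PySem.Dict.erase, PySem.Dict.getD, PySem.Dict.get?]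
  rw [pvFindFilterNone]
  rfl

theorem pvFindFilterNe (l : List (Char × Int)) (k x : Char) (h : x ≠ k) :
    (l.filter (fun p => !(p.1 == k))).find? (fun p => p.1 == x) = l.find? (fun p => p.1 == x) := by
  induction l with
  | nil => simp
  | cons p t ih =>
    by_cases hp : p.1 = k
    · have hpx : ¬ (p.1 = x) := by rw [hp]; exact fun hx => h hx.symm
      rw [List.filter_cons_of_neg (by simp [hp]), List.find?_cons_of_neg (by simp [hpx]), ih]
    · rw [List.filter_cons_of_pos (by simp [hp])]
      by_cases hx : p.1 = x
      · rw [List.find?_cons_of_pos (by simp [hx]), List.find?_cons_of_pos (by simp [hx])]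
      · rw [List.find?_cons_of_neg (by simp [hx]), List.find?_cons_of_neg (by simp [hx]), ih]

theorem pvGetDEraseNe (d : PySem.Dict Char Int) {k x : Char} (h : x ≠ k) :
    (d.erase k).getD x 0 = d.getD x 0 := by
  simp only [PySem.Dict.erase, PySem.Dict.getD, PySem.Dict.get?]
  rw [pvFindFilterNe d.items k x h]

-- multiset facts about the greedy matching
theorem pvInterConsMem (r l : Multiset Char) (c : Char) (h : c ∈ r) :
    r ∩ (c ::ₘ l) = c ::ₘ (r.erase c ∩ l) := by
  have hc : 1 ≤ r.count c := Multiset.one_le_count_iff_mem.mpr h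
  ext x
  by_cases hx : x = c
  · subst hx
    simp [Multiset.count_inter, Multiset.count_cons_self, Multiset.count_erase_self]
    omega
  · simp [Multiset.count_inter, Multiset.count_cons_of_ne hx, Multiset.count_erase_of_ne hx]

theorem pvInterConsNotMem (r l : Multiset Char) (c : Char) (h : c ∉ r) :
    r ∩ (c ::ₘ l) = r ∩ l := by
  have hc : r.count c = 0 := Multiset.count_eq_zero.mpr h
  ext x
  by_cases hx : x = c
  · subst hx; simp [Multiset.count_inter, hc]
  · simp [Multiset.count_inter, Multiset.count_cons_of_ne hx]

-- the loop invariant for A: the dict carries exactly the multiset r of still-unmatched s1-characters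
theorem pvLoopA (l : List Char) (r : Multiset Char) (d : PySem.Dict Char Int) (s : Int)
    (h1 : ∀ x, d.contains x = decide (x ∈ r))
    (h2 : ∀ x, d.getD x 0 = (r.count x : Int)) :
    (l.foldl pvStepA (d, s)).2 = s + ((r ∩ (↑l : Multiset Char)).card : Int) := by
  induction l generalizing r d s with
  | nil => simp
  | cons c t ih =>
    rw [List.foldl_cons]
    have hcoe : (↑(c :: t) : Multiset Char) = c ::ₘ (↑t : Multiset Char) := rfl
    by_cases hc : c ∈ r
    · have hcont : d.contains c = true := by rw [h1]; simp [hc]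
      have hcnt : 1 ≤ r.count c := Multiset.one_le_count_iff_mem.mpr hc
      have hmod : (d.modify c 0 (fun v => v - 1)).getD c 0 = (r.count c : Int) - 1 := by
        rw [PySem.Dict.getD_modify_self, h2]
      by_cases h1c : r.count c = 1
      · -- the count drops to 0: the key is popped
        have htest : ((d.modify c 0 (fun v => v - 1)).getD c 0 == 0) = true := by
          rw [hmod, h1c]; rfl
        have hstep : pvStepA (d, s) c = ((d.modify c 0 (fun v => v - 1)).erase c, s + 1) := by
          simp only [pvStepA, hcont, htest]; simp
        rw [hstep]
        rw [ih (r.erase c) _ _ ?_ ?_]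
        · rw [hcoe, pvInterConsMem r _ c hc]
          simp only [Multiset.card_cons]
          push_cast
          ring
        · intro x
          by_cases hx : x = c
          · subst hx
            rw [pvContainsEraseSelf]
            have : (r.erase x).count x = 0 := by rw [Multiset.count_erase_self]; omega
            have hnm : x ∉ r.erase x := Multiset.count_eq_zero.mp this
            simp [hnm]
          · rw [pvContainsEraseNe _ hx, PySem.Dict.contains_modify, h1]
            simp [hx, Multiset.mem_erase_of_ne hx]
        · intro x
          by_cases hx : x = c
          · subst hx
            rw [pvGetDEraseSelf]
            rw [Multiset.count_erase_self]
            omega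
          · rw [pvGetDEraseNe _ hx, PySem.Dict.getD_modify_of_ne _ _ _ hx, h2,
                Multiset.count_erase_of_ne hx]
      · -- the count stays positive: the key remains
        have htest : ((d.modify c 0 (fun v => v - 1)).getD c 0 == 0) = false := by
          rw [hmod]
          have : (r.count c : Int) - 1 ≠ 0 := by omega
          simpa using this
        have hstep : pvStepA (d, s) c = (d.modify c 0 (fun v => v - 1), s + 1) := by
          simp only [pvStepA, hcont, htest]; simp
        rw [hstep]
        rw [ih (r.erase c) _ _ ?_ ?_]
        · rw [hcoe, pvInterConsMem r _ c hc]
          simp only [Multiset.card_cons]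
          push_cast
          ring
        · intro x
          rw [PySem.Dict.contains_modify]
          by_cases hx : x = c
          · subst hx
            have : x ∈ r.erase x := by
              rw [← Multiset.one_le_count_iff_mem, Multiset.count_erase_self]
              omega
            simp [this]
          · rw [h1]
            simp [hx, Multiset.mem_erase_of_ne hx]
        · intro x
          by_cases hx : x = c
          · subst hx
            rw [PySem.Dict.getD_modify_self, h2, Multiset.count_erase_self]
            omega
          · rw [PySem.Dict.getD_modify_of_ne _ _ _ hx, h2, Multiset.count_erase_of_ne hx]
    · have hcont : d.contains c = false := by rw [h1]; simp [hc]
      have hstep : pvStepA (d, s) c = (d, s) := by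
        simp only [pvStepA, hcont]; simp
      rw [hstep, ih r d s h1 h2, hcoe, pvInterConsNotMem r _ c hc]

-- B computes the same cardinality of the multiset intersection
theorem pvAltEq (s1 s2 : String) :
    solution_alt s1 s2 = (((↑s1.toList : Multiset Char) ∩ (↑s2.toList : Multiset Char)).card : Int) := by
  unfold solution_alt
  have key : ((PySem.Set.ofList s1.toList).map
      (fun c => Multiset.count c ((↑s1.toList : Multiset Char) ∩ ↑s2.toList))).sum
      = ((↑s1.toList : Multiset Char) ∩ ↑s2.toList).card := by
    have hnd := PySem.Set.nodup_ofList s1.toList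
    rw [← List.sum_toFinset _ hnd]
    have hfs : (PySem.Set.ofList s1.toList).toFinset = s1.toList.toFinset := by
      ext x; simp [List.mem_toFinset, PySem.Set.mem_ofList]
    rw [hfs, ← Multiset.toFinset_sum_count_eq ((↑s1.toList : Multiset Char) ∩ ↑s2.toList)]
    symm
    apply Finset.sum_subset
    · intro x hx
      rw [Multiset.mem_toFinset, Multiset.mem_inter] at hx
      rw [List.mem_toFinset]
      exact hx.1
    · intro x _ hnx
      rw [Multiset.mem_toFinset] at hnx
      exact Multiset.count_eq_zero.mpr hnx
  have hfun : (fun c => min ((s1.toList.count c : Int)) ((s2.toList.count c : Int)))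
      = (fun n : Nat => (n : Int)) ∘ (fun c => Multiset.count c ((↑s1.toList : Multiset Char) ∩ ↑s2.toList)) := by
    funext c
    simp only [Function.comp]
    rw [Multiset.count_inter]
    simp [Multiset.coe_count, Nat.cast_min]
  rw [hfun, ← List.map_map]
  rw [show (fun n : Nat => (n : Int)) = (Nat.cast : Nat → Int) from rfl]
  rw [← Nat.cast_list_sum, key]

-- ===== VERDICT (by name: the statement is the Claim_ definition above) =====
theorem solution_spec : Claim_equal_solution := by
  intro s1 s2 _
  unfold Spec_solution
  show (s2.toList.foldl pvStepA (PySem.Dict.counter s1.toList, 0)).2 = solution_alt s1 s2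
  rw [pvLoopA s2.toList (↑s1.toList) (PySem.Dict.counter s1.toList) 0 ?_ ?_]
  · rw [pvAltEq]; ring
  · intro x
    rw [PySem.Dict.contains_counter]
    simp [Multiset.mem_coe]
  · intro x
    rw [PySem.Dict.getD_counter]
    rw [Multiset.coe_count]
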